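-- pv_equiv track=rewrite | github.com/pbelskiy/contest | leetcode.com/3637_trionic_array_1/solution.py | isTrionic
-- ===== SOURCE A (Python) =====
-- from typing import List
--
-- def isTrionic(nums: List[int]) -> bool:
--     if len(nums) < 4:
--         return False
--
--     # greedily increase left part
--     left = 0
--     while left + 1 < len(nums) - 1 and nums[left + 1] > nums[left]:
--         left += 1
--
--     # size must be > 1
--     if left == 0:
--         return False
--
--     # greedily increase right part
--     right = len(nums) - 1
--     while right > left + 1 and nums[right - 1] < nums[right]:
--         right -= 1
--
--     # size must be > 1
--     if right == len(nums) - 1: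
--         return False
--
--     arr = nums[left:right+1]
--     return len(arr) == len(set(arr)) and arr == sorted(arr, reverse=True)
-- ===== SOURCE B (Python) =====
-- def isTrionic(nums):
--     # one forward three-phase scan: climb, descend, climb; no sort/set
--     n = len(nums)
--     if n < 4:
--         return False
--     i = 1
--     while i < n and nums[i - 1] < nums[i]:
--         i += 1
--     p = i
--     while i < n and nums[i - 1] > nums[i]:
--         i += 1
--     q = i
--     while i < n and nums[i - 1] < nums[i]:
--         i += 1
--     return i == n and p >= 2 and q > p and q < n
-- ===== Notes on version B (the rewrite author's own statement) =====
-- stated objective: simpler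
-- what changed: A finds the increasing prefix, walks the increasing suffix backwards and then verifies the middle slice via set-deduplication plus a reverse sort; B is one forward three-phase scan (climb, descend, climb) with no slicing, no set and no sort.
import Mathlib
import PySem

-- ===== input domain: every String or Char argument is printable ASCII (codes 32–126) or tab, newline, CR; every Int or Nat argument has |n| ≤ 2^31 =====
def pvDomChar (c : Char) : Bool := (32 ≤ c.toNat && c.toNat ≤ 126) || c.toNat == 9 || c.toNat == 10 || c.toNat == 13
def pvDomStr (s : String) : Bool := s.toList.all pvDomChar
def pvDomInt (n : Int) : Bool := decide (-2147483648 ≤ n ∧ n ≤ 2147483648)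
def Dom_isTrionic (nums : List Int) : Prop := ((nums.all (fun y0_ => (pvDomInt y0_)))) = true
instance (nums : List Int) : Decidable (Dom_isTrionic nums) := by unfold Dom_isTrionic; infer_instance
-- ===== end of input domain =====

-- B replaces A's backward scan plus set/sort check of the middle segment by one forward
-- three-phase scan (climb, descend, climb); objective: a simpler single-pass algorithm.

-- ===== PORT A =====
-- while left + 1 < len(nums) - 1 and nums[left + 1] > nums[left]: left += 1
-- (every index accessed is in range, so getD matches Python's nums[i] exactly here)
def leftLoopA (nums : List Int) (left : Nat) : Nat :=
  if h : left + 1 < nums.length - 1 ∧ nums.getD (left + 1) 0 > nums.getD left 0 then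
    leftLoopA nums (left + 1)
  else left
termination_by nums.length - left
decreasing_by exact Nat.sub_succ_lt_self _ _ (Nat.lt_of_succ_lt (Nat.lt_of_lt_of_le h.1 (Nat.sub_le _ _)))

-- while right > left + 1 and nums[right - 1] < nums[right]: right -= 1
def rightLoopA (nums : List Int) (left right : Nat) : Nat :=
  if h : right > left + 1 ∧ nums.getD (right - 1) 0 < nums.getD right 0 then
    rightLoopA nums left (right - 1)
  else right
termination_by right
decreasing_by exact Nat.sub_lt (Nat.zero_lt_of_lt h.1) Nat.one_pos

def isTrionic (nums : List Int) : Bool :=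
  if nums.length < 4 then false
  else
    let left := leftLoopA nums 0
    if left = 0 then false
    else
      let right := rightLoopA nums left (nums.length - 1)
      if right = nums.length - 1 then false
      else
        let arr := PySem.List.slice nums (some (left : Int)) (some ((right : Int) + 1))
        decide (arr.length = (PySem.Set.ofList arr).length) &&
          decide (arr = PySem.List.sorted arr (fun x => x) true)

-- ===== PORT B =====
-- while i < n and nums[i-1] < nums[i]: i += 1   (both climbing phases of Source B)
def uphillB (nums : List Int) (i : Nat) : Nat :=
  if h : i < nums.length ∧ nums.getD (i - 1) 0 < nums.getD i 0 then
    uphillB nums (i + 1)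
  else i
termination_by nums.length - i
decreasing_by exact Nat.sub_succ_lt_self _ _ h.1

-- while i < n and nums[i-1] > nums[i]: i += 1
def downhillB (nums : List Int) (i : Nat) : Nat :=
  if h : i < nums.length ∧ nums.getD (i - 1) 0 > nums.getD i 0 then
    downhillB nums (i + 1)
  else i
termination_by nums.length - i
decreasing_by exact Nat.sub_succ_lt_self _ _ h.1

def isTrionic_alt (nums : List Int) : Bool :=
  if nums.length < 4 then false
  else
    let p := uphillB nums 1
    let q := downhillB nums p
    let i := uphillB nums q
    decide (i = nums.length) && decide (2 ≤ p) && decide (p < q) && decide (q < nums.length)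

-- ===== PRECONDITION & SPEC =====
def Spec_isTrionic (nums : List Int) (out : Bool) : Prop := out = isTrionic_alt nums
instance (nums : List Int) (out : Bool) : Decidable (Spec_isTrionic nums out) := by unfold Spec_isTrionic; infer_instance

-- ===== CLAIM (what is proved, stated in full; the proofs are below) =====
def Claim_equal_isTrionic : Prop := ∀ (nums : List Int), Dom_isTrionic nums → Spec_isTrionic nums (isTrionic nums)

-- ===== LEMMAS AND PROOFS =====

-- the common shape: strictly up to index a, strictly down to index b, strictly up to the end
def TriShape (nums : List Int) : Prop :=
  ∃ a b : Nat, 1 ≤ a ∧ a < b ∧ b + 2 ≤ nums.length ∧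
    (∀ j, j < a → nums.getD j 0 < nums.getD (j + 1) 0) ∧
    (∀ j, a ≤ j → j < b → nums.getD (j + 1) 0 < nums.getD j 0) ∧
    (∀ j, b ≤ j → j + 1 < nums.length → nums.getD j 0 < nums.getD (j + 1) 0)

theorem leftLoopA_spec (nums : List Int) (l : Nat) :
    l ≤ leftLoopA nums l ∧
    (∀ j, l ≤ j → j < leftLoopA nums l → nums.getD j 0 < nums.getD (j + 1) 0) ∧
    ¬(leftLoopA nums l + 1 < nums.length - 1 ∧
        nums.getD (leftLoopA nums l) 0 < nums.getD (leftLoopA nums l + 1) 0) := by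
  fun_induction leftLoopA nums l with
  | case1 l h ih =>
    obtain ⟨ih1, ih2, ih3⟩ := ih
    refine ⟨by omega, ?_, ih3⟩
    intro j hj1 hj2
    rcases Nat.eq_or_lt_of_le hj1 with rfl | hl
    · exact h.2
    · exact ih2 j hl hj2
  | case2 l h =>
    exact ⟨le_refl l, fun j h1 h2 => absurd h1 (by omega), fun hc => h ⟨hc.1, hc.2⟩⟩

theorem rightLoopA_spec (nums : List Int) (l r : Nat) :
    rightLoopA nums l r ≤ r ∧
    (rightLoopA nums l r = r ∨ l + 1 ≤ rightLoopA nums l r) ∧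
    (∀ j, rightLoopA nums l r ≤ j → j < r → nums.getD j 0 < nums.getD (j + 1) 0) ∧
    ¬(l + 1 < rightLoopA nums l r ∧
        nums.getD (rightLoopA nums l r - 1) 0 < nums.getD (rightLoopA nums l r) 0) := by
  fun_induction rightLoopA nums l r with
  | case1 r h ih =>
    obtain ⟨ih1, ih2, ih3, ih4⟩ := ih
    have hr2 : l + 1 ≤ rightLoopA nums l (r - 1) := by
      rcases ih2 with h2 | h2 <;> omega
    refine ⟨by omega, Or.inr hr2, ?_, ih4⟩
    intro j hj1 hj2
    by_cases hje : j < r - 1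
    · exact ih3 j hj1 hje
    · have hje' : j = r - 1 := by omega
      subst hje'
      have hre : r - 1 + 1 = r := by omega
      rw [hre]
      exact h.2
  | case2 r h =>
    exact ⟨le_refl r, Or.inl rfl, fun j h1 h2 => absurd h1 (by omega), fun hc => h ⟨hc.1, hc.2⟩⟩

theorem uphillB_spec (nums : List Int) (i0 : Nat) :
    i0 ≤ uphillB nums i0 ∧
    (uphillB nums i0 = i0 ∨ uphillB nums i0 ≤ nums.length) ∧
    (∀ j, i0 ≤ j → j < uphillB nums i0 → nums.getD (j - 1) 0 < nums.getD j 0) ∧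
    ¬(uphillB nums i0 < nums.length ∧
        nums.getD (uphillB nums i0 - 1) 0 < nums.getD (uphillB nums i0) 0) := by
  fun_induction uphillB nums i0 with
  | case1 i h ih =>
    obtain ⟨ih1, ih2, ih3, ih4⟩ := ih
    have hle : uphillB nums (i + 1) ≤ nums.length := by
      rcases ih2 with h2 | h2 <;> omega
    refine ⟨by omega, Or.inr hle, ?_, ih4⟩
    intro j hj1 hj2
    rcases Nat.eq_or_lt_of_le hj1 with rfl | hl
    · exact h.2
    · exact ih3 j hl hj2
  | case2 i h =>
    exact ⟨le_refl i, Or.inl rfl, fun j h1 h2 => absurd h1 (by omega), fun hc => h hc⟩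

theorem downhillB_spec (nums : List Int) (i0 : Nat) :
    i0 ≤ downhillB nums i0 ∧
    (downhillB nums i0 = i0 ∨ downhillB nums i0 ≤ nums.length) ∧
    (∀ j, i0 ≤ j → j < downhillB nums i0 → nums.getD (j - 1) 0 > nums.getD j 0) ∧
    ¬(downhillB nums i0 < nums.length ∧
        nums.getD (downhillB nums i0 - 1) 0 > nums.getD (downhillB nums i0) 0) := by
  fun_induction downhillB nums i0 with
  | case1 i h ih =>
    obtain ⟨ih1, ih2, ih3, ih4⟩ := ih
    have hle : downhillB nums (i + 1) ≤ nums.length := by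
      rcases ih2 with h2 | h2 <;> omega
    refine ⟨by omega, Or.inr hle, ?_, ih4⟩
    intro j hj1 hj2
    rcases Nat.eq_or_lt_of_le hj1 with rfl | hl
    · exact h.2
    · exact ih3 j hl hj2
  | case2 i h =>
    exact ⟨le_refl i, Or.inl rfl, fun j h1 h2 => absurd h1 (by omega), fun hc => h hc⟩

-- len(arr) == len(set(arr)) and arr == sorted(arr, reverse=True)  ⟺  strictly decreasing
theorem strict_dec_iff (arr : List Int) :
    (arr.length = (PySem.Set.ofList arr).length ∧
      arr = PySem.List.sorted arr (fun x => x) true) ↔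
    arr.Pairwise (· > ·) := by
  constructor
  · rintro ⟨hlen, hsort⟩
    have hsp : List.Subperm (PySem.Set.ofList arr) arr :=
      List.subperm_of_subset (PySem.Set.nodup_ofList arr)
        (fun x hx => (PySem.Set.mem_ofList arr x).mp hx)
    have hperm : (PySem.Set.ofList arr).Perm arr := hsp.perm_of_length_le (le_of_eq hlen)
    have hnd : arr.Nodup := hperm.nodup (PySem.Set.nodup_ofList arr)
    have hge : arr.Pairwise (fun a b : Int => b ≤ a) := by
      have h := PySem.List.sorted_pairwise_rev arr (fun x : Int => x)
      rw [← hsort] at h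
      exact h
    exact (hge.and hnd).imp (fun hc => lt_of_le_of_ne hc.1 (Ne.symm hc.2))
  · intro hp
    have hnd : arr.Nodup := hp.imp (fun h => h.ne')
    have hsub1 : List.Subperm arr (PySem.Set.ofList arr) :=
      List.subperm_of_subset hnd (fun x hx => (PySem.Set.mem_ofList arr x).mpr hx)
    have hsub2 : List.Subperm (PySem.Set.ofList arr) arr :=
      List.subperm_of_subset (PySem.Set.nodup_ofList arr)
        (fun x hx => (PySem.Set.mem_ofList arr x).mp hx)
    refine ⟨le_antisymm hsub1.length_le hsub2.length_le, ?_⟩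
    exact (PySem.List.sorted_rev_eq_of_perm_of_pairwise_gt arr arr (fun x : Int => x)
      (List.Perm.refl arr) hp).symm

theorem pairwise_window (nums : List Int) (L m : Nat) (hm : L + m ≤ nums.length) :
    ((nums.drop L).take m).Pairwise (fun x y : Int => x > y) ↔
    (∀ j, L ≤ j → j + 1 < L + m → nums.getD (j + 1) 0 < nums.getD j 0) := by
  have hlen : ((nums.drop L).take m).length = m := by
    simp only [List.length_take, List.length_drop]
    omega
  have key : ∀ (i : Nat) (h : i < ((nums.drop L).take m).length),
      ((nums.drop L).take m)[i] = nums.getD (L + i) 0 := by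
    intro i h
    rw [hlen] at h
    rw [List.getElem_take, List.getElem_drop, List.getD_eq_getElem nums 0 (by omega)]
  rw [← List.isChain_iff_pairwise, List.isChain_iff_getElem]
  constructor
  · intro h j hj1 hj2
    have h' := h (j - L) (by omega)
    rw [key (j - L) (by omega), key (j - L + 1) (by omega)] at h'
    have e1 : L + (j - L) = j := by omega
    have e2 : L + (j - L + 1) = j + 1 := by omega
    rw [e1, e2] at h'
    exact h'
  · intro h i hi
    rw [key i (by omega), key (i + 1) hi]
    have h' := h (L + i) (by omega) (by rw [hlen] at hi; omega)
    exact h'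

theorem A_iff (nums : List Int) (h4 : ¬ nums.length < 4) :
    isTrionic nums = true ↔ TriShape nums := by
  obtain ⟨hL1, hL2, hL3⟩ := leftLoopA_spec nums 0
  obtain ⟨hR1, hR2, hR3, hR4⟩ :=
    rightLoopA_spec nums (leftLoopA nums 0) (nums.length - 1)
  have hcast : ∀ R : Nat, ((R : Int) + 1) = ((R + 1 : Nat) : Int) := by
    intro R; push_cast; ring
  constructor
  · intro hA
    simp only [isTrionic, if_neg h4] at hA
    by_cases hL0 : leftLoopA nums 0 = 0
    · rw [if_pos hL0] at hA; exact absurd hA (by simp)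
    rw [if_neg hL0] at hA
    by_cases hR0 : rightLoopA nums (leftLoopA nums 0) (nums.length - 1) = nums.length - 1
    · rw [if_pos hR0] at hA; exact absurd hA (by simp)
    rw [if_neg hR0] at hA
    rw [Bool.and_eq_true, decide_eq_true_iff, decide_eq_true_iff] at hA
    obtain ⟨ha1, ha2⟩ := hA
    rw [hcast, PySem.List.slice_natCast] at ha1 ha2
    have hLR : leftLoopA nums 0 + 1 ≤ rightLoopA nums (leftLoopA nums 0) (nums.length - 1) := by
      rcases hR2 with h2 | h2
      · exact absurd h2 hR0
      · exact h2
    have hdec := (pairwise_window nums (leftLoopA nums 0)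
        (rightLoopA nums (leftLoopA nums 0) (nums.length - 1) + 1 - leftLoopA nums 0)
        (by omega)).mp ((strict_dec_iff _).mp ⟨ha1, ha2⟩)
    refine ⟨leftLoopA nums 0, rightLoopA nums (leftLoopA nums 0) (nums.length - 1),
      by omega, by omega, by omega, ?_, ?_, ?_⟩
    · intro j hj; exact hL2 j (Nat.zero_le j) hj
    · intro j hj1 hj2; exact hdec j hj1 (by omega)
    · intro j hj1 hj2; exact hR3 j hj1 (by omega)
  · rintro ⟨a, b, hab1, hab2, hab3, hP1, hP2, hP3⟩
    have hLa : leftLoopA nums 0 = a := by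
      rcases lt_trichotomy (leftLoopA nums 0) a with hlt | heq | hgt
      · exact absurd ⟨by omega, hP1 _ hlt⟩ hL3
      · exact heq
      · have h1 := hL2 a (Nat.zero_le a) hgt
        have h2 := hP2 a (le_refl a) hab2
        exact absurd h1 (by omega)
    have hRb : rightLoopA nums (leftLoopA nums 0) (nums.length - 1) = b := by
      rcases lt_trichotomy (rightLoopA nums (leftLoopA nums 0) (nums.length - 1)) b
        with hlt | heq | hgt
      · have hge : a ≤ rightLoopA nums (leftLoopA nums 0) (nums.length - 1) := by
          rcases hR2 with h2 | h2 <;> omega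
        have h1 := hR3 _ (le_refl _) (by omega)
        have h2 := hP2 _ hge hlt
        exact absurd h1 (by omega)
      · exact heq
      · have hidx : rightLoopA nums (leftLoopA nums 0) (nums.length - 1) - 1 + 1 =
            rightLoopA nums (leftLoopA nums 0) (nums.length - 1) := by omega
        have h1 := hP3 (rightLoopA nums (leftLoopA nums 0) (nums.length - 1) - 1)
          (by omega) (by omega)
        rw [hidx] at h1
        exact absurd ⟨by omega, h1⟩ hR4
    simp only [isTrionic, if_neg h4]
    rw [if_neg (by omega), if_neg (by omega)]
    rw [Bool.and_eq_true, decide_eq_true_iff, decide_eq_true_iff]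
    rw [hcast, PySem.List.slice_natCast, hRb, hLa]
    have hpw := (pairwise_window nums a (b + 1 - a) (by omega)).mpr
      (fun j hj1 hj2 => hP2 j hj1 (by omega))
    exact (strict_dec_iff _).mpr hpw

theorem B_iff (nums : List Int) (h4 : ¬ nums.length < 4) :
    isTrionic_alt nums = true ↔ TriShape nums := by
  obtain ⟨hP1', hP2', hP3', hP4'⟩ := uphillB_spec nums 1
  obtain ⟨hQ1, hQ2, hQ3, hQ4⟩ := downhillB_spec nums (uphillB nums 1)
  obtain ⟨hI1, hI2, hI3, hI4⟩ := uphillB_spec nums (downhillB nums (uphillB nums 1))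
  constructor
  · intro hB
    simp only [isTrionic_alt, if_neg h4] at hB
    rw [Bool.and_eq_true, Bool.and_eq_true, Bool.and_eq_true,
      decide_eq_true_iff, decide_eq_true_iff, decide_eq_true_iff, decide_eq_true_iff] at hB
    obtain ⟨⟨⟨hIn, hp2⟩, hpq⟩, hqn⟩ := hB
    refine ⟨uphillB nums 1 - 1, downhillB nums (uphillB nums 1) - 1,
      by omega, by omega, by omega, ?_, ?_, ?_⟩
    · intro j hj
      have h := hP3' (j + 1) (by omega) (by omega)
      simpa using h
    · intro j hj1 hj2
      have h := hQ3 (j + 1) (by omega) (by omega)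
      simpa using h
    · intro j hj1 hj2
      have h := hI3 (j + 1) (by omega) (by omega)
      simpa using h
  · rintro ⟨a, b, hab1, hab2, hab3, hS1, hS2, hS3⟩
    have hPa : uphillB nums 1 = a + 1 := by
      rcases lt_trichotomy (uphillB nums 1) (a + 1) with hlt | heq | hgt
      · have hidx : uphillB nums 1 - 1 + 1 = uphillB nums 1 := by omega
        have h1 := hS1 (uphillB nums 1 - 1) (by omega)
        rw [hidx] at h1
        exact absurd ⟨by omega, h1⟩ hP4'
      · exact heq
      · have h1 := hP3' (a + 1) (by omega) hgt
        have h2 := hS2 a (le_refl a) hab2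
        simp only [Nat.add_sub_cancel] at h1
        exact absurd h1 (by omega)
    have hQb : downhillB nums (uphillB nums 1) = b + 1 := by
      rcases lt_trichotomy (downhillB nums (uphillB nums 1)) (b + 1) with hlt | heq | hgt
      · have hidx : downhillB nums (uphillB nums 1) - 1 + 1 =
            downhillB nums (uphillB nums 1) := by omega
        have h1 := hS2 (downhillB nums (uphillB nums 1) - 1) (by omega) (by omega)
        rw [hidx] at h1
        exact absurd ⟨by omega, h1⟩ hQ4
      · exact heq
      · have h1 := hQ3 (b + 1) (by omega) hgt
        have h2 := hS3 b (le_refl b) (by omega)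
        simp only [Nat.add_sub_cancel] at h1
        exact absurd h1 (by omega)
    have hIn : uphillB nums (downhillB nums (uphillB nums 1)) = nums.length := by
      have hle : uphillB nums (downhillB nums (uphillB nums 1)) ≤ nums.length := by
        rcases hI2 with h2 | h2
        · exfalso
          apply hI4
          rw [h2, hQb]
          refine ⟨by omega, ?_⟩
          simpa using hS3 b (le_refl b) (by omega)
        · exact h2
      rcases Nat.eq_or_lt_of_le hle with heq | hlt
      · exact heq
      · exfalso
        have hidx : uphillB nums (downhillB nums (uphillB nums 1)) - 1 + 1 =
            uphillB nums (downhillB nums (uphillB nums 1)) := by omega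
        have h1 := hS3 (uphillB nums (downhillB nums (uphillB nums 1)) - 1)
          (by omega) (by omega)
        rw [hidx] at h1
        exact absurd ⟨hlt, h1⟩ hI4
    simp only [isTrionic_alt, if_neg h4]
    rw [Bool.and_eq_true, Bool.and_eq_true, Bool.and_eq_true,
      decide_eq_true_iff, decide_eq_true_iff, decide_eq_true_iff, decide_eq_true_iff]
    exact ⟨⟨⟨hIn, by omega⟩, by omega⟩, by omega⟩

-- ===== VERDICT (by name: the statement is the Claim_ definition above) =====
theorem isTrionic_spec : Claim_equal_isTrionic := by
  intro nums _
  unfold Spec_isTrionic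
  by_cases h4 : nums.length < 4
  · simp [isTrionic, isTrionic_alt, h4]
  · have h := (A_iff nums h4).trans (B_iff nums h4).symm
    cases hA : isTrionic nums <;> cases hB : isTrionic_alt nums <;> simp_all
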